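-- pv_equiv track=rewrite | github.com/bolzanMGB/2025.2_Testes_AAE-4 | validador_expressao/validador/validador_expressao.py | validador_expressao
-- ===== SOURCE A (Python) =====
-- OPERADORES = "+-*/" # Constante movida para cá
--
-- def validador_expressao(expressao):
--     """
--     1. Verifica se os parênteses na expressão estão balanceados.
--     Retorna True se está válido, False caso contrário.
--     """
--     contador = 0
--     ultimo_char_valido = ""
--     primeiro_char_valido = ""
--     for char in expressao:
--
--         if char == ' ':
--             continue
--
--         # NOVO: Captura o primeiro caractere válido (não-espaço)
--         if primeiro_char_valido == "":
--             primeiro_char_valido = char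
--
--         if char in OPERADORES and ultimo_char_valido in OPERADORES:
--             return False
--
--         if char == "(":
--             contador += 1
--         elif char == ")":
--             contador -= 1
--             # Fecha mais do que abriu
--             if contador < 0:
--                 return False
--
--         ultimo_char_valido = char
--
--     # Caso de string vazia ou só com espaços
--     if primeiro_char_valido == "":
--         return False
--
--     # Se todos os parênteses foram fechados corretamente
--     # o contator deve estar zerado
--
--     # Retorna True APENAS SE todas as condições finais passarem
--     return (
--         contador == 0 and  # Regra 1
--         primeiro_char_valido not in OPERADORES and # Regra 3
--         ultimo_char_valido not in OPERADORES   # Regra 3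
--     )
-- ===== SOURCE B (Python) =====
-- OPERADORES = "+-*/"
--
-- def validador_expressao(expressao):
--     chars = [c for c in expressao if c != ' ']
--     if not chars:
--         return False
--     saldo = 0
--     for c in chars:
--         if c == '(':
--             saldo += 1
--         elif c == ')':
--             saldo -= 1
--             if saldo < 0:
--                 return False
--     if saldo != 0:
--         return False
--     if any(a in OPERADORES and b in OPERADORES for a, b in zip(chars, chars[1:])):
--         return False
--     return chars[0] not in OPERADORES and chars[-1] not in OPERADORES
-- ===== Notes on version B (the rewrite author's own statement) =====
-- stated objective: simpler
-- what changed: A's single fused scan carrying counter/first/last state with early returns is replaced by a filter of spaces followed by three independent checks: a paren-balance scan, an adjacent-pair operator scan, and direct first/last character tests.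
import Mathlib
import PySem

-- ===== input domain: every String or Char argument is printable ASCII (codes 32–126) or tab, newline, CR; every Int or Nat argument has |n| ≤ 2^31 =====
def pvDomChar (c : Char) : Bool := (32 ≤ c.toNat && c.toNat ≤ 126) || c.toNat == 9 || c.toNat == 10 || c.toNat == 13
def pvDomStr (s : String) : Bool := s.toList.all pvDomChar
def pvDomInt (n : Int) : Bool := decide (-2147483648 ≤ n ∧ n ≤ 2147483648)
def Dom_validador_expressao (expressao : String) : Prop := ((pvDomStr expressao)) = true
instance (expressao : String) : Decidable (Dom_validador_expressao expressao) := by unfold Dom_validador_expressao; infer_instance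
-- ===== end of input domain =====

-- ===== PORT A =====
-- Header: B filters spaces first, then runs three separate checks (balance, adjacent
-- operators, first/last char) instead of A's single fused stateful scan; objective: simpler.
def OPERADORES : List Char := ['+', '-', '*', '/']

-- ultimo/primeiro model Python's "" / one-char string as Option Char; note Python's
-- '"" in OPERADORES' is True, hence 'none' counts as an operator in the double-operator test.
def vGoA : List Char → Int → Option Char → Option Char → Bool
  | [], contador, ultimo, primeiro =>
    match primeiro with
    | none => false
    | some p =>
      decide (contador = 0) && !(OPERADORES.contains p) &&
        (match ultimo with
         | none => false  -- unreachable when primeiro is some; Python '"" in OPERADORES' would be True here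
         | some u => !(OPERADORES.contains u))
  | ch :: rest, contador, ultimo, primeiro =>
    if ch = ' ' then vGoA rest contador ultimo primeiro
    else
      let primeiro' := match primeiro with | none => some ch | some p => some p
      if OPERADORES.contains ch &&
         (match ultimo with | none => true | some u => OPERADORES.contains u) then
        false
      else if ch = '(' then vGoA rest (contador + 1) (some ch) primeiro'
      else if ch = ')' then
        if contador - 1 < 0 then false
        else vGoA rest (contador - 1) (some ch) primeiro'
      else vGoA rest contador (some ch) primeiro'

def validador_expressao (expressao : String) : Bool :=
  vGoA expressao.toList 0 none none

-- ===== PORT B =====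
-- balance scan: early False on a negative saldo, final saldo must be 0
def balScan : List Char → Int → Bool
  | [], saldo => decide (saldo = 0)
  | c :: rest, saldo =>
    if c = '(' then balScan rest (saldo + 1)
    else if c = ')' then
      if saldo - 1 < 0 then false else balScan rest (saldo - 1)
    else balScan rest saldo

-- adjacent-pair scan: true iff no two consecutive chars are both operators
def noAdj : List Char → Bool
  | a :: b :: rest => !(OPERADORES.contains a && OPERADORES.contains b) && noAdj (b :: rest)
  | _ => true

def validador_expressao_alt (expressao : String) : Bool :=
  let chars := expressao.toList.filter (fun c => c ≠ ' ')
  match chars with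
  | [] => false
  | c :: rest =>
    if !(balScan (c :: rest) 0) then false
    else if !(noAdj (c :: rest)) then false
    else !(OPERADORES.contains c) && !(OPERADORES.contains ((c :: rest).getLastD ' '))

-- ===== PRECONDITION & SPEC =====
def Spec_validador_expressao (expressao : String) (out : Bool) : Prop := out = validador_expressao_alt expressao
instance (expressao : String) (out : Bool) : Decidable (Spec_validador_expressao expressao out) := by unfold Spec_validador_expressao; infer_instance

-- ===== CLAIM (what is proved, stated in full; the proofs are below) =====
def Claim_equal_validador_expressao : Prop := ∀ (expressao : String), Dom_validador_expressao expressao → Spec_validador_expressao expressao (validador_expressao expressao)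

-- ===== LEMMAS AND PROOFS =====

theorem lastD_cons : ∀ (l : List Char) (c d : Char),
    (c :: l).getLast?.getD d = l.getLast?.getD c := by
  intro l
  induction l with
  | nil => intro c d; rfl
  | cons x xs ih =>
    intro c d
    rw [List.getLast?_cons_cons]
    rw [ih x d, ih x c]

theorem vGoA_filter : ∀ (cs : List Char) (n : Int) (u p : Option Char),
    vGoA cs n u p = vGoA (cs.filter (fun c => c ≠ ' ')) n u p := by
  intro cs
  induction cs with
  | nil => intro n u p; rfl
  | cons c rest ih =>
    intro n u p
    by_cases h : c = ' '
    · simp [vGoA, h, ih]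
    · simp [vGoA, h, ih]

theorem vGoA_nospace : ∀ (cs : List Char), (∀ c ∈ cs, c ≠ ' ') → ∀ (n : Int) (u p : Char),
    vGoA cs n (some u) (some p) =
      (balScan cs n && noAdj (u :: cs) && !(OPERADORES.contains p) &&
        !(OPERADORES.contains ((u :: cs).getLastD ' '))) := by
  intro cs
  induction cs with
  | nil =>
    intro _ n u p
    by_cases hn : n = 0 <;> by_cases hp : p ∈ OPERADORES <;> by_cases hu : u ∈ OPERADORES <;>
      simp_all [vGoA, balScan, noAdj, List.getLastD]
  | cons c rest ih =>
    intro hns n u p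
    have hc : c ≠ ' ' := hns c List.mem_cons_self
    have hns' : ∀ x ∈ rest, x ≠ ' ' := fun x hx => hns x (List.mem_cons_of_mem _ hx)
    by_cases hcO : c ∈ OPERADORES <;> by_cases huO : u ∈ OPERADORES
    · -- double operator: both sides false
      have h1 : c ≠ '(' := by rintro rfl; revert hcO; decide
      have h2 : c ≠ ')' := by rintro rfl; revert hcO; decide
      simp [vGoA, noAdj, hc, hcO, huO, h1, h2]
    · have h1 : c ≠ '(' := by rintro rfl; revert hcO; decide
      have h2 : c ≠ ')' := by rintro rfl; revert hcO; decide
      by_cases hp : p ∈ OPERADORES <;>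
        simp_all [vGoA, noAdj, balScan, ih hns', lastD_cons,
          Bool.and_assoc, Bool.and_comm, Bool.and_left_comm]
    · by_cases h1 : c = '('
      · subst h1
        by_cases hp : p ∈ OPERADORES <;>
          simp_all [vGoA, noAdj, balScan, ih hns', lastD_cons,
            Bool.and_assoc, Bool.and_comm, Bool.and_left_comm]
      · by_cases h2 : c = ')'
        · subst h2
          by_cases hneg : n - 1 < 0 <;> by_cases hp : p ∈ OPERADORES <;>
            simp_all [vGoA, noAdj, balScan, ih hns', lastD_cons,
              Bool.and_assoc, Bool.and_comm, Bool.and_left_comm]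
        · by_cases hp : p ∈ OPERADORES <;>
            simp_all [vGoA, noAdj, balScan, ih hns', lastD_cons,
              Bool.and_assoc, Bool.and_comm, Bool.and_left_comm]
    · by_cases h1 : c = '('
      · subst h1
        by_cases hp : p ∈ OPERADORES <;>
          simp_all [vGoA, noAdj, balScan, ih hns', lastD_cons,
            Bool.and_assoc, Bool.and_comm, Bool.and_left_comm]
      · by_cases h2 : c = ')'
        · subst h2
          by_cases hneg : n - 1 < 0 <;> by_cases hp : p ∈ OPERADORES <;>
            simp_all [vGoA, noAdj, balScan, ih hns', lastD_cons,
              Bool.and_assoc, Bool.and_comm, Bool.and_left_comm]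
        · by_cases hp : p ∈ OPERADORES <;>
            simp_all [vGoA, noAdj, balScan, ih hns', lastD_cons,
              Bool.and_assoc, Bool.and_comm, Bool.and_left_comm]

-- ===== VERDICT (by name: the statement is the Claim_ definition above) =====
theorem validador_expressao_spec : Claim_equal_validador_expressao := by
  intro e _
  unfold Spec_validador_expressao validador_expressao validador_expressao_alt
  rw [vGoA_filter]
  have hns : ∀ c ∈ e.toList.filter (fun c => c ≠ ' '), c ≠ ' ' := by
    intro c hc
    simpa using (List.mem_filter.mp hc).2
  cases hcs : e.toList.filter (fun c => c ≠ ' ') with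
  | nil => simp [vGoA]
  | cons c rest =>
    rw [hcs] at hns
    have hc : c ≠ ' ' := hns c List.mem_cons_self
    have hns' : ∀ x ∈ rest, x ≠ ' ' := fun x hx => hns x (List.mem_cons_of_mem _ hx)
    simp only [vGoA, hc, if_false, reduceIte]
    by_cases hop : c ∈ OPERADORES
    · -- first char is an operator: A returns False immediately (Python's "" in OPERADORES is True);
      -- B fails its first-char test (or an earlier check)
      have h1 : c ≠ '(' := by rintro rfl; revert hop; decide
      have h2 : c ≠ ')' := by rintro rfl; revert hop; decide
      cases hb : balScan (c :: rest) 0 <;> cases hn : noAdj (c :: rest) <;>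
        simp_all
    · by_cases h1 : c = '('
      · subst h1
        rw [vGoA_nospace rest hns' (0 + 1) '(' '(']
        cases hb : balScan rest (0 + 1) <;> cases hn : noAdj ('(' :: rest) <;>
          simp_all [balScan, lastD_cons, Bool.and_assoc, Bool.and_comm, Bool.and_left_comm]
      · by_cases h2 : c = ')'
        · subst h2
          have hneg : ((0 : Int) - 1 < 0) := by omega
          simp [balScan, hneg, hop]
        · rw [if_neg h1, if_neg h2, vGoA_nospace rest hns' 0 c c]
          cases hb : balScan rest 0 <;> cases hn : noAdj (c :: rest) <;>
            simp_all [balScan, lastD_cons, Bool.and_assoc, Bool.and_comm, Bool.and_left_comm]
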